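-- pv_equiv track=rewrite | github.com/ChristopherTanamas/Data-Structure-Project | Tree/AVL Tree.py | convert
-- ===== SOURCE A (Python) =====
-- def convert_to_num(char):
--     char_to_num_dictionary = {
--         'a': 1, 'A': 1,
--         'b': 2, 'B': 2,
--         'c': 3, 'C': 3,
--         'd': 4, 'D': 4,
--         'e': 5, 'E': 5,
--         'f': 6, 'F': 6,
--         'g': 7, 'G': 7,
--         'h': 8, 'H': 8,
--         'i': 9, 'I': 9,
--         'j': 10, 'J': 10,
--         'k': 11, 'K': 11,
--         'l': 12, 'L': 12,
--         'm': 13, 'M': 13,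
--         'n': 14, 'N': 14,
--         'o': 15, 'O': 15,
--         'p': 16, 'P': 16,
--         'q': 17, 'Q': 17,
--         'r': 18, 'R': 18,
--         's': 19, 'S': 19,
--         't': 20, 'T': 20,
--         'u': 21, 'U': 21,
--         'v': 22, 'V': 22,
--         'w': 23, 'W': 23,
--         'x': 24, 'X': 24,
--         'y': 25, 'Y': 25,
--         'z': 26, 'Z': 26,
--         ' ': 27
--     }
--     return char_to_num_dictionary[char]
--
-- def convert(name):
--     array = []
--     number = 0
--     for i in range(len(name)):
--         index = convert_to_num(name[i])
--         array.append(index)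
--     for i in array:
--         if i < 10:
--             number = number*10 + i
--         else:
--             number = number*100 + i
--     return number
-- ===== SOURCE B (Python) =====
-- def convert(name):
--     total = 0
--     mult = 1
--     for c in reversed(name):
--         if c == ' ':
--             v = 27
--         elif c.isalpha():
--             v = ord(c.lower()) - ord('a') + 1
--         else:
--             raise KeyError(c)
--         total += v * mult
--         mult *= 10 if v < 10 else 100
--     return total
-- ===== Notes on version B (the rewrite author's own statement) =====
-- stated objective: simpler
-- what changed: Replaces the 54-entry literal dict plus two passes (build an index array, then a left-to-right Horner fold) with a single right-to-left pass that computes each value arithmetically from ord(c.lower()) and accumulates value*place-multiplier, growing the multiplier by 10 or 100 per character.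
import Mathlib
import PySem

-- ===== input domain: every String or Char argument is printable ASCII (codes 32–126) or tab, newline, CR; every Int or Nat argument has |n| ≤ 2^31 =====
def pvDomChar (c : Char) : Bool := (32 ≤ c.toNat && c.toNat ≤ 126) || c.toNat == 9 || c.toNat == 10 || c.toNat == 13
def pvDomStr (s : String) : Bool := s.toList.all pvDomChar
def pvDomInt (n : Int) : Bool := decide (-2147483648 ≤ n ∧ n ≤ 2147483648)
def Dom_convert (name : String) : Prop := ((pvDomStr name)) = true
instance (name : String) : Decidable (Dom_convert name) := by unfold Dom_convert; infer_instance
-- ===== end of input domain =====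

-- B replaces A's literal dict and two passes with one right-to-left pass computing
-- each value from ord(c.lower()) and a growing place multiplier (objective: simpler).

-- ===== PORT A =====
def charToNumDictionary : PySem.Dict Char Int := PySem.Dict.ofList
  [('a',1),('A',1),('b',2),('B',2),('c',3),('C',3),('d',4),('D',4),('e',5),('E',5),
   ('f',6),('F',6),('g',7),('G',7),('h',8),('H',8),('i',9),('I',9),('j',10),('J',10),
   ('k',11),('K',11),('l',12),('L',12),('m',13),('M',13),('n',14),('N',14),('o',15),('O',15),
   ('p',16),('P',16),('q',17),('Q',17),('r',18),('R',18),('s',19),('S',19),('t',20),('T',20),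
   ('u',21),('U',21),('v',22),('V',22),('w',23),('W',23),('x',24),('X',24),('y',25),('Y',25),
   ('z',26),('Z',26),(' ',27)]

-- dictionary[char]: Python raises KeyError when absent; Pre_convert excludes those inputs
def convert_to_num (char : Char) : Int := (charToNumDictionary.get? char).getD 0

def convert (name : String) : Int :=
  let array := name.toList.foldl (fun a c => a ++ [convert_to_num c]) []
  array.foldl (fun number i => if i < 10 then number * 10 + i else number * 100 + i) 0

-- ===== PORT B =====
-- value of one character; Python B raises KeyError in the last branch (Pre_ excludes it)
def altVal (c : Char) : Int :=
  if c = ' ' then 27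
  else if PySem.Chars.isalpha c then ((PySem.Chars.lowerChar c).toNat : Int) - 96
  else 0

def convert_alt (name : String) : Int :=
  (name.toList.reverse.foldl
    (fun (p : Int × Int) c =>
      let v := altVal c
      (p.1 + v * p.2, p.2 * (if v < 10 then 10 else 100)))
    (0, 1)).1

-- ===== PRECONDITION & SPEC =====
def pvValidChars : List Char :=
  ['a','b','c','d','e','f','g','h','i','j','k','l','m','n','o','p','q','r','s','t','u','v','w','x','y','z','A','B','C','D','E','F','G','H','I','J','K','L','M','N','O','P','Q','R','S','T','U','V','W','X','Y','Z',' ']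

-- exactly the inputs on which A returns: every character is a letter or the space (else KeyError)
def Pre_convert (name : String) : Prop := (name.toList.all (fun c => pvValidChars.contains c)) = true
instance (name : String) : Decidable (Pre_convert name) := by unfold Pre_convert; infer_instance

def pvWitness_convert : String := "Hi"

def Spec_convert (name : String) (out : Int) : Prop := out = convert_alt name
instance (name : String) (out : Int) : Decidable (Spec_convert name out) := by unfold Spec_convert; infer_instance

-- ===== CLAIM (what is proved, stated in full; the proofs are below) =====
def Claim_equal_convert : Prop := ∀ (name : String), Dom_convert name → Pre_convert name → Spec_convert name (convert name)

-- ===== LEMMAS AND PROOFS =====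

-- on valid characters the two per-character values agree
set_option maxRecDepth 4096 in
lemma char_val_eq : ∀ c ∈ pvValidChars, convert_to_num c = altVal c := by
  intro c hc
  fin_cases hc <;> decide

-- A's Horner fold over a value list equals B's reverse fold with a place multiplier
lemma horner_eq_rev (vs : List Int) :
    ∀ n : Int, vs.foldl (fun number i => if i < 10 then number * 10 + i else number * 100 + i) n
      = n * (vs.reverse.foldl
              (fun (p : Int × Int) v => (p.1 + v * p.2, p.2 * (if v < 10 then 10 else 100)))
              (0, 1)).2
        + (vs.reverse.foldl
              (fun (p : Int × Int) v => (p.1 + v * p.2, p.2 * (if v < 10 then 10 else 100)))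
              (0, 1)).1 := by
  induction vs with
  | nil => intro n; simp
  | cons a vs ih =>
    intro n
    simp only [List.foldl_cons, List.reverse_cons, List.foldl_append, List.foldl_cons,
      List.foldl_nil, ih]
    split_ifs <;> ring

-- ===== VERDICT (by name: the statement is the Claim_ definition above) =====
theorem convert_spec : Claim_equal_convert := by
  intro name _ pre
  rw [Pre_convert, List.all_eq_true] at pre
  unfold Spec_convert convert convert_alt
  simp only [PySem.List.foldl_append_singleton_eq_map, List.nil_append]
  have hmap : name.toList.map convert_to_num = name.toList.map altVal :=
    List.map_congr_left (fun c hc => char_val_eq c (by simpa using pre c hc))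
  have hfold :
      name.toList.reverse.foldl
        (fun (p : Int × Int) c =>
          let v := altVal c
          (p.1 + v * p.2, p.2 * (if v < 10 then 10 else 100))) (0, 1)
      = (name.toList.map altVal).reverse.foldl
        (fun (p : Int × Int) v => (p.1 + v * p.2, p.2 * (if v < 10 then 10 else 100))) (0, 1) := by
    rw [← List.map_reverse, List.foldl_map]
  rw [hmap, horner_eq_rev, hfold]
  ring
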